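-- pv_equiv track=rewrite | github.com/mmontalbo/binary_lens | scripts/collectors/cli.py | decode_short_opt_string
-- ===== SOURCE A (Python) =====
-- def decode_short_opt_string(value):
--     if not value:
--         return []
--     options = []
--     idx = 0
--     length = len(value)
--     while idx < length:
--         ch = value[idx]
--         if idx == 0 and ch in (":", "+", "-"):
--             idx += 1
--             continue
--         if ch == ":":
--             idx += 1
--             continue
--         has_arg = "no"
--         if idx + 1 < length and value[idx + 1] == ":":
--             if idx + 2 < length and value[idx + 2] == ":":
--                 has_arg = "optional"
--                 idx += 2
--             else:
--                 has_arg = "required"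
--                 idx += 1
--         options.append({
--             "short_name": ch,
--             "has_arg": has_arg,
--         })
--         idx += 1
--     return options
-- ===== SOURCE B (Python) =====
-- def decode_short_opt_string(value):
--     options = []
--     for i, ch in enumerate(value):
--         if ch == ":":
--             if options:
--                 cur = options[-1]["has_arg"]
--                 options[-1]["has_arg"] = {"no": "required", "required": "optional"}.get(cur, cur)
--         elif i == 0 and ch in "+-":
--             continue
--         else:
--             options.append({"short_name": ch, "has_arg": "no"})
--     return options
-- ===== Notes on version B (the rewrite author's own statement) =====
-- stated objective: simpler
-- what changed: Replaced the while-loop lookahead parser with manual index jumps by a single for-loop over enumerate(value) that appends an option per character and, on each colon character, retroactively bumps the previous option's has_arg (no, then required, then optional, capped).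
import Mathlib
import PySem

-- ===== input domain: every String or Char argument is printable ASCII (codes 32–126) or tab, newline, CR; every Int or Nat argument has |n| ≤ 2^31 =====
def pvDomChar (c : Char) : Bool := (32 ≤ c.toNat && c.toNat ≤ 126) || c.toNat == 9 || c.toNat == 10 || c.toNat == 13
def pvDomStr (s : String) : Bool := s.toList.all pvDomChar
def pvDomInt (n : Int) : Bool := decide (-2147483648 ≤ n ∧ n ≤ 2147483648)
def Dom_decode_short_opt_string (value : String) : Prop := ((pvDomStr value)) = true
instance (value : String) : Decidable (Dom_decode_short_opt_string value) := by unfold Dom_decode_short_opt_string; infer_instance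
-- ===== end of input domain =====

-- B replaces A's while-loop lookahead parser by a single for-loop that appends an option per
-- character and retroactively bumps the last option's has_arg on each colon (objective: simpler).

-- a dict literal {"short_name": ch, "has_arg": ha} as an insertion-ordered assoc list
def mkOpt (ch : Char) (ha : String) : List (String × String) :=
  [("short_name", String.ofList [ch]), ("has_arg", ha)]

-- ===== PORT A =====
-- A's while loop, recursion on idx; value[idx] is read with getD (every read is in range)
def aGo (cs : List Char) (idx : Nat) (options : List (List (String × String))) :
    List (List (String × String)) :=
  if h : idx < cs.length then
    if idx = 0 ∧ (cs.getD idx ' ' = ':' ∨ cs.getD idx ' ' = '+' ∨ cs.getD idx ' ' = '-') then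
      aGo cs (idx + 1) options
    else if cs.getD idx ' ' = ':' then
      aGo cs (idx + 1) options
    else if idx + 1 < cs.length ∧ cs.getD (idx + 1) ' ' = ':' then
      if idx + 2 < cs.length ∧ cs.getD (idx + 2) ' ' = ':' then
        aGo cs (idx + 3) (options ++ [mkOpt (cs.getD idx ' ') "optional"])
      else
        aGo cs (idx + 2) (options ++ [mkOpt (cs.getD idx ' ') "required"])
    else
      aGo cs (idx + 1) (options ++ [mkOpt (cs.getD idx ' ') "no"])
  else options
termination_by cs.length - idx
decreasing_by all_goals omega

def decode_short_opt_string (value : String) : List (List (String × String)) :=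
  if value = "" then [] else aGo value.toList 0 []

-- ===== PORT B =====
-- Python dict read d[k] / assignment d[k] = v on an assoc list (first match; overwrite
-- in place, append if absent); exact for the dicts B builds (keys present, distinct).
def dictGetD (d : List (String × String)) (k dflt : String) : String :=
  match d.find? (fun kv => kv.1 = k) with
  | some kv => kv.2
  | none => dflt

def dictSet (d : List (String × String)) (k v : String) : List (String × String) :=
  if d.any (fun kv => kv.1 = k) then d.map (fun kv => if kv.1 = k then (k, v) else kv)
  else d ++ [(k, v)]

-- {"no": "required", "required": "optional"}.get(cur, cur)
def bumpArg (cur : String) : String :=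
  if cur = "no" then "required" else if cur = "required" then "optional" else cur

-- one iteration of B's for-loop body
def bStep (options : List (List (String × String))) (i : Nat) (ch : Char) :
    List (List (String × String)) :=
  if ch = ':' then
    if options = [] then options
    else
      options.dropLast ++
        [dictSet (options.getLastD []) "has_arg"
          (bumpArg (dictGetD (options.getLastD []) "has_arg" ""))]
  else if i = 0 ∧ (ch = '+' ∨ ch = '-') then options
  else options ++ [mkOpt ch "no"]

-- for i, ch in enumerate(value)
def bGo (cs : List Char) (i : Nat) (options : List (List (String × String))) :
    List (List (String × String)) :=
  match cs with
  | [] => options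
  | c :: rest => bGo rest (i + 1) (bStep options i c)

def decode_short_opt_string_alt (value : String) : List (List (String × String)) :=
  bGo value.toList 0 []

-- ===== PRECONDITION & SPEC =====
def Spec_decode_short_opt_string (value : String) (out : List (List (String × String))) : Prop := out = decode_short_opt_string_alt value
instance (value : String) (out : List (List (String × String))) : Decidable (Spec_decode_short_opt_string value out) := by unfold Spec_decode_short_opt_string; infer_instance

-- ===== CLAIM (what is proved, stated in full; the proofs are below) =====
def Claim_equal_decode_short_opt_string : Prop := ∀ (value : String), Dom_decode_short_opt_string value → Spec_decode_short_opt_string value (decode_short_opt_string value)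

-- ===== LEMMAS AND PROOFS =====

-- invariant: whenever the loops sit on a ':' (past index 0), the most recent option —
-- if any — is already "optional", so B's retroactive bump is a no-op exactly where A skips
def ColInv (cs : List Char) (idx : Nat) (options : List (List (String × String))) : Prop :=
  cs.getD idx ' ' = ':' →
    options = [] ∨ ∃ s opts', options = opts' ++ [[("short_name", s), ("has_arg", "optional")]]

lemma bStep_colon_optional (s : String) (opts' : List (List (String × String))) (i : Nat) :
    bStep (opts' ++ [[("short_name", s), ("has_arg", "optional")]]) i ':' =
      opts' ++ [[("short_name", s), ("has_arg", "optional")]] := by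
  simp [bStep, dictGetD, dictSet, bumpArg, List.find?]

lemma bStep_bump_no (opts' : List (List (String × String))) (ch : Char) (i : Nat) :
    bStep (opts' ++ [mkOpt ch "no"]) i ':' = opts' ++ [mkOpt ch "required"] := by
  simp [bStep, mkOpt, dictGetD, dictSet, bumpArg, List.find?]

lemma bStep_bump_required (opts' : List (List (String × String))) (ch : Char) (i : Nat) :
    bStep (opts' ++ [mkOpt ch "required"]) i ':' = opts' ++ [mkOpt ch "optional"] := by
  simp [bStep, mkOpt, dictGetD, dictSet, bumpArg, List.find?]

lemma drop_cons_of_lt (cs : List Char) (idx : Nat) (h : idx < cs.length) :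
    cs.drop idx = cs.getD idx ' ' :: cs.drop (idx + 1) := by
  rw [List.getD_eq_getElem cs ' ' h, List.drop_eq_getElem_cons h]

lemma getD_ne_colon_of_not (cs : List Char) (j : Nat)
    (h : ¬(j < cs.length ∧ cs.getD j ' ' = ':')) : cs.getD j ' ' ≠ ':' := by
  intro hc
  rcases Nat.lt_or_ge j cs.length with hl | hl
  · exact h ⟨hl, hc⟩
  · rw [List.getD_eq_default _ _ hl] at hc
    exact absurd hc (by decide)

lemma main_lemma (n : Nat) :
    ∀ (cs : List Char) (idx : Nat) (options : List (List (String × String))),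
      cs.length - idx ≤ n →
      (idx = 0 → ¬(cs.getD 0 ' ' = ':' ∨ cs.getD 0 ' ' = '+' ∨ cs.getD 0 ' ' = '-')) →
      ColInv cs idx options →
      aGo cs idx options = bGo (cs.drop idx) idx options := by
  induction n with
  | zero =>
    intro cs idx options hn _ _
    have hge : cs.length ≤ idx := by omega
    rw [aGo, dif_neg (by omega), List.drop_eq_nil_of_le hge, bGo]
  | succ n ih =>
    intro cs idx options hn hz hcol
    by_cases h : idx < cs.length
    · rw [drop_cons_of_lt cs idx h, bGo, aGo, dif_pos h]
      by_cases hcolon : cs.getD idx ' ' = ':'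
      · -- A skips the colon; B's bump is a no-op by the invariant
        have hidx0 : idx ≠ 0 := fun e => hz e (Or.inl (e ▸ hcolon))
        rw [if_neg (by simp [hidx0]), if_pos hcolon]
        have hb : bStep options idx (cs.getD idx ' ') = options := by
          rw [hcolon]
          rcases hcol hcolon with h0 | ⟨s, opts', rfl⟩
          · simp [bStep, h0]
          · exact bStep_colon_optional s opts' idx
        rw [hb]
        exact ih cs (idx + 1) options (by omega) (by omega) (fun _ => hcol hcolon)
      · have hsp : ¬(idx = 0 ∧ (cs.getD idx ' ' = ':' ∨ cs.getD idx ' ' = '+' ∨ cs.getD idx ' ' = '-')) := by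
          rintro ⟨h0, hd⟩; exact hz h0 (h0 ▸ hd)
        rw [if_neg hsp, if_neg hcolon]
        have hbs : bStep options idx (cs.getD idx ' ') = options ++ [mkOpt (cs.getD idx ' ') "no"] := by
          unfold bStep
          rw [if_neg hcolon, if_neg (by rintro ⟨h0, hpm⟩; exact hz h0 (h0 ▸ Or.inr hpm))]
        rw [hbs]
        by_cases h1 : idx + 1 < cs.length ∧ cs.getD (idx + 1) ' ' = ':'
        · by_cases h2 : idx + 2 < cs.length ∧ cs.getD (idx + 2) ' ' = ':'
          · rw [if_pos h1, if_pos h2,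
              drop_cons_of_lt cs (idx + 1) h1.1, bGo, h1.2, bStep_bump_no,
              drop_cons_of_lt cs (idx + 2) h2.1, bGo, h2.2, bStep_bump_required]
            exact ih cs (idx + 3) _ (by omega) (by omega)
              (fun _ => Or.inr ⟨String.ofList [cs.getD idx ' '], options, rfl⟩)
          · rw [if_pos h1, if_neg h2, drop_cons_of_lt cs (idx + 1) h1.1, bGo, h1.2, bStep_bump_no]
            exact ih cs (idx + 2) _ (by omega) (by omega)
              (fun hc => absurd hc (getD_ne_colon_of_not cs (idx + 2) h2))
        · rw [if_neg h1]
          exact ih cs (idx + 1) _ (by omega) (by omega)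
            (fun hc => absurd hc (getD_ne_colon_of_not cs (idx + 1) h1))
    · rw [aGo, dif_neg h, List.drop_eq_nil_of_le (by omega), bGo]

lemma top_equal (cs : List Char) : aGo cs 0 [] = bGo cs 0 [] := by
  cases cs with
  | nil => rw [aGo, dif_neg (by simp), bGo]
  | cons c rest =>
    by_cases hc0 : c = ':' ∨ c = '+' ∨ c = '-'
    · -- both skip the first character
      rw [aGo, dif_pos (by simp), if_pos ⟨rfl, by simpa using hc0⟩, bGo]
      have hb : bStep [] 0 c = [] := by
        rcases hc0 with hc | hc | hc <;> simp [bStep, hc]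
      rw [hb]
      have := main_lemma (c :: rest).length (c :: rest) 1 [] (by omega) (by omega)
        (fun _ => Or.inl rfl)
      simpa using this
    · have := main_lemma (c :: rest).length (c :: rest) 0 [] (by omega)
        (fun _ hd => hc0 (by simpa using hd)) (fun _ => Or.inl rfl)
      rwa [List.drop_zero] at this

-- ===== VERDICT (by name: the statement is the Claim_ definition above) =====
theorem decode_short_opt_string_spec : Claim_equal_decode_short_opt_string := by
  intro value _
  unfold Spec_decode_short_opt_string decode_short_opt_string decode_short_opt_string_alt
  by_cases hv : value = ""
  · subst hv; rw [if_pos rfl]; rfl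
  · rw [if_neg hv]; exact top_equal value.toList
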